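-- pv_equiv track=rewrite | github.com/carlhuth/ctools | fakemodule/py_module_gen.py | title_indent
-- ===== SOURCE A (Python) =====
-- def title_indent(title, string, separate=': '):
--     # 'param hoge' ['comment1', 'comment2']
--     # -> ['param hoge: comment1', '    comment2']
--     ls = string.split('\n')
--     if ls:
--         if title:
--             title += separate
--         return [title + ls[0]] + ['    ' + s for s in ls[1:]]
--     else:
--         return []
-- ===== SOURCE B (Python) =====
-- def title_indent(title, string, separate=': '):
--     # Single left-to-right character scan with an accumulator: no split, no
--     # per-line comprehension; lines are flushed as each '\n' is encountered.
--     out = []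
--     cur = title + separate if title else title
--     for c in string:
--         if c == '\n':
--             out.append(cur)
--             cur = '    '
--         else:
--             cur += c
--     out.append(cur)
--     return out
-- ===== Notes on version B (the rewrite author's own statement) =====
-- stated objective: alternative
-- what changed: Replaces A's split('\n') plus a per-line indentation comprehension by a single left-to-right character scan with an accumulator that flushes a finished line at each newline, so no split and no per-line loop exist at all.
import Mathlib
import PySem

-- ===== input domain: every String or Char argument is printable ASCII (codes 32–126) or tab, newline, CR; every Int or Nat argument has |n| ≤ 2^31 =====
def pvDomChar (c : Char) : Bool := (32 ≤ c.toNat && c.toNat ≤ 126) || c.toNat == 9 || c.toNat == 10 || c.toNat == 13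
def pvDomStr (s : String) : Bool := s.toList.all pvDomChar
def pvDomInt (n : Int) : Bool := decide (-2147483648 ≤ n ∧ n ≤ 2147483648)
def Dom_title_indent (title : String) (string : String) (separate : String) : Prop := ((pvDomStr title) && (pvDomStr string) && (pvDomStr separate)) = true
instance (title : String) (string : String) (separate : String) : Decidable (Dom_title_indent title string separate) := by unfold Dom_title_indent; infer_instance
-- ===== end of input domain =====

-- B replaces A's split('\n') plus per-line comprehension by a single character scan with an
-- accumulator that flushes a line at each newline (alternative decomposition, same cost).

-- ===== PORT A =====
def title_indent (title : String) (string : String) (separate : String) : List String :=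
  -- ls = string.split('\n'); sep "\n" ≠ "" so split? is always `some`
  match (PySem.Str.split? string "\n").getD [] with
  | [] => []                                   -- A's `else: return []` branch (split never yields [])
  | l0 :: rest =>
      let t := if title ≠ "" then title ++ separate else title
      (t ++ l0) :: rest.map (fun s => "    " ++ s)

-- ===== PORT B =====
def title_indent_alt (title : String) (string : String) (separate : String) : List String :=
  let cur0 := if title ≠ "" then title ++ separate else title
  let r := string.toList.foldl
    (fun (st : List String × String) c =>
      if c = '\n' then (st.1 ++ [st.2], "    ") else (st.1, st.2.push c))
    ([], cur0)
  r.1 ++ [r.2]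

-- ===== PRECONDITION & SPEC =====
def Spec_title_indent (title : String) (string : String) (separate : String) (out : List String) : Prop := out = title_indent_alt title string separate
instance (title : String) (string : String) (separate : String) (out : List String) : Decidable (Spec_title_indent title string separate out) := by unfold Spec_title_indent; infer_instance

-- ===== CLAIM (what is proved, stated in full; the proofs are below) =====
def Claim_equal_title_indent : Prop := ∀ (title : String) (string : String) (separate : String), Dom_title_indent title string separate → Spec_title_indent title string separate (title_indent title string separate)

-- ===== LEMMAS AND PROOFS =====

-- simple structural model of s.split('\n') on List Char
def pvSp : List Char → List (List Char)
  | [] => [[]]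
  | c :: t => if c = '\n' then [] :: pvSp t else (pvSp t).modifyHead (fun x => c :: x)

lemma modifyHead_modifyHead' {α : Type} (f g : List α → List α) (l : List (List α)) :
    (l.modifyHead g).modifyHead f = l.modifyHead (fun x => f (g x)) := by
  cases l <;> simp

lemma modifyHead_id' {α : Type} (l : List (List α)) : l.modifyHead (fun x => x) = l := by
  cases l <;> simp

lemma pv_splitOn_go_eq : ∀ (fuel : Nat) (l cur : List Char) (acc : List (List Char)),
    l.length ≤ fuel →
    PySem.Chars.splitOn.go ['\n'] fuel l cur acc
      = acc.reverse ++ (pvSp l).modifyHead (fun x => cur.reverse ++ x) := by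
  intro fuel
  induction fuel with
  | zero =>
      intro l cur acc h
      have : l = [] := by cases l <;> simp_all
      subst this
      simp [PySem.Chars.splitOn.go, pvSp]
  | succ f ih =>
      intro l cur acc h
      cases l with
      | nil => simp [PySem.Chars.splitOn.go, pvSp]
      | cons c rest =>
          rw [PySem.Chars.splitOn.go]
          by_cases hc : c = '\n'
          · subst hc
            simp only [List.isPrefixOf, beq_self_eq_true, Bool.true_and,
              if_pos, List.length_cons, List.drop_succ_cons, List.drop_zero, List.length_nil]
            rw [ih rest [] (cur.reverse :: acc) (by simpa using Nat.le_of_succ_le_succ h)]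
            simp [pvSp, modifyHead_id']
          · have hpre : List.isPrefixOf ['\n'] (c :: rest) = false := by
              simp [List.isPrefixOf]; intro hh; exact absurd hh.symm hc
            rw [hpre]
            simp only [Bool.false_eq_true, if_false]
            rw [ih rest (c :: cur) acc (by simpa using Nat.le_of_succ_le_succ h)]
            simp only [pvSp]
            rw [if_neg hc, modifyHead_modifyHead']
            simp only [List.reverse_cons, List.append_assoc, List.singleton_append]

lemma pv_splitOn_eq (cs : List Char) : PySem.Chars.splitOn cs ['\n'] = pvSp cs := by
  unfold PySem.Chars.splitOn
  rw [pv_splitOn_go_eq (cs.length + 1) cs [] [] (by omega)]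
  simp [modifyHead_id']

lemma pvSp_ne_nil (cs : List Char) : pvSp cs ≠ [] := by
  induction cs with
  | nil => simp [pvSp]
  | cons c t ih =>
      simp only [pvSp]
      split
      · simp
      · cases h : pvSp t with
        | nil => exact absurd h ih
        | cons a l => simp

-- the B-side fold, characterised against the line model pvSp
lemma pv_fold_eq : ∀ (cs : List Char) (cur : String) (out : List String),
    (let r := cs.foldl
      (fun (st : List String × String) c =>
        if c = '\n' then (st.1 ++ [st.2], "    ") else (st.1, st.2.push c))
      (out, cur)
     r.1 ++ [r.2])
    = out ++ (cur ++ String.ofList ((pvSp cs).headI))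
        :: (pvSp cs).tail.map (fun x => "    " ++ String.ofList x) := by
  intro cs
  induction cs with
  | nil => intro cur out; simp [pvSp]
  | cons c t ih =>
      intro cur out
      by_cases hc : c = '\n'
      · subst hc
        simp only [List.foldl_cons, pvSp]
        rw [ih]
        cases h : pvSp t with
        | nil => exact absurd h (pvSp_ne_nil t)
        | cons hline tl => simp
      · simp only [List.foldl_cons, if_neg hc, pvSp]
        rw [ih]
        cases h : pvSp t with
        | nil => exact absurd h (pvSp_ne_nil t)
        | cons hline tl =>
            simp only [List.modifyHead, List.headI, List.tail]
            congr 2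
            apply String.toList_injective
            simp

-- ===== VERDICT (by name: the statement is the Claim_ definition above) =====
theorem title_indent_spec : Claim_equal_title_indent := by
  intro title string separate _
  unfold Spec_title_indent title_indent title_indent_alt
  have hnl : ("\n" : String).toList = ['\n'] := rfl
  have hsplit : (PySem.Str.split? string "\n").getD []
      = (pvSp string.toList).map String.ofList := by
    simp [PySem.Str.split?, PySem.Chars.split?, hnl, pv_splitOn_eq]
  rw [hsplit]
  have hfold := pv_fold_eq string.toList
    (if title ≠ "" then title ++ separate else title) []
  simp only [] at hfold
  cases h : pvSp string.toList with
  | nil => exact absurd h (pvSp_ne_nil string.toList)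
  | cons l0 tl =>
      rw [h] at hfold
      simp only [List.map_cons, hfold, List.nil_append, List.headI, List.tail, List.map_map]
      rfl
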